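-- pv_equiv track=rewrite | github.com/alexxschulzz/Deployment-Architecture-Generator | full_architectureGenerator.py | all_components_from_same_provider
-- ===== SOURCE A (Python) =====
-- def all_components_from_same_provider(combination):
--     providers = ['Amazon', 'Azure', 'Google']
--     counts = {provider: 0 for provider in providers}
--     for stack in combination:
--         for component in stack:
--             for provider in providers:
--                 if provider in component:
--                     counts[provider] += 1
--                     break
--
--
--     num_valid_providers = sum(1 for count in counts.values() if count > 0)
--
--     return num_valid_providers <= 1
-- ===== SOURCE B (Python) =====
-- def all_components_from_same_provider(combination):
--     seen = None
--     for stack in combination: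
--         for component in stack:
--             if 'Amazon' in component:
--                 p = 'Amazon'
--             elif 'Azure' in component:
--                 p = 'Azure'
--             elif 'Google' in component:
--                 p = 'Google'
--             else:
--                 continue
--             if seen is None:
--                 seen = p
--             elif seen != p:
--                 return False
--     return True
-- ===== Notes on version B (the rewrite author's own statement) =====
-- stated objective: alternative
-- what changed: Replaces A's per-provider counts dict and separate count-then-sum pass with a single-pass state machine that remembers the one provider seen so far and returns False immediately on the first conflicting component.
import Mathlib
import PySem

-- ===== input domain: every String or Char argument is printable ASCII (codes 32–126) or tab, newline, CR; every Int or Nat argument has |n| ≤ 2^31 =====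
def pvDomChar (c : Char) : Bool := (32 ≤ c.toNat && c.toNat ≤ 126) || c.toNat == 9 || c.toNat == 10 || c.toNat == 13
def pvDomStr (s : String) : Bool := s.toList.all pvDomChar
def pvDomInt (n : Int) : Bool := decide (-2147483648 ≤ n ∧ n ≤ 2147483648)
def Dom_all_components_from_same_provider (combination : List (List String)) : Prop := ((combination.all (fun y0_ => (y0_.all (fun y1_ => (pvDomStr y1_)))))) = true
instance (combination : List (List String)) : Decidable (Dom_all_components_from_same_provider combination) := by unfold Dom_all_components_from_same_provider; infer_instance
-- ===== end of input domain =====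

-- B replaces A's per-provider counts dict and its count-then-sum pass by a single-pass state
-- machine remembering the one provider seen so far, returning False on the first conflict;
-- objective: alternative (no speed claim).

-- ===== PORT A =====
def pvProviders : List String := ["Amazon", "Azure", "Google"]

-- inner 'for provider in providers: if provider in component: counts[provider] += 1; break'
def pvMatchLoop (counts : PySem.Dict String Int) (component : String) :
    List String → PySem.Dict String Int
  | [] => counts
  | p :: rest =>
      if PySem.Str.isIn p component then counts.modify p 0 (· + 1)
      else pvMatchLoop counts component rest

def all_components_from_same_provider (combination : List (List String)) : Bool :=
  let counts0 := pvProviders.foldl (fun d p => d.insert p (0 : Int)) PySem.Dict.empty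
  let counts := combination.foldl
    (fun c stack => stack.foldl (fun c component => pvMatchLoop c component pvProviders) c) counts0
  let numValid := counts.values.foldl (fun acc count => if count > 0 then acc + 1 else acc) (0 : Int)
  decide (numValid ≤ 1)

-- ===== PORT B =====
-- the if/elif/elif/else chain classifying one component
def pvClassify (component : String) : Option String :=
  if PySem.Str.isIn "Amazon" component then some "Amazon"
  else if PySem.Str.isIn "Azure" component then some "Azure"
  else if PySem.Str.isIn "Google" component then some "Google"
  else none

-- inner 'for component in stack': none = the early 'return False' fired, some = updated seen
def pvInner (seen : Option String) : List String → Option (Option String)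
  | [] => some seen
  | comp :: rest =>
      match pvClassify comp with
      | none => pvInner seen rest
      | some p =>
        match seen with
        | none => pvInner (some p) rest
        | some q => if q = p then pvInner seen rest else none

-- outer 'for stack in combination'
def pvOuter (seen : Option String) : List (List String) → Bool
  | [] => true
  | stack :: rest =>
      match pvInner seen stack with
      | none => false
      | some seen' => pvOuter seen' rest

def all_components_from_same_provider_alt (combination : List (List String)) : Bool :=
  pvOuter none combination

-- ===== PRECONDITION & SPEC =====
def Spec_all_components_from_same_provider (combination : List (List String)) (out : Bool) : Prop := out = all_components_from_same_provider_alt combination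
instance (combination : List (List String)) (out : Bool) : Decidable (Spec_all_components_from_same_provider combination out) := by unfold Spec_all_components_from_same_provider; infer_instance

-- ===== CLAIM (what is proved, stated in full; the proofs are below) =====
def Claim_equal_all_components_from_same_provider : Prop := ∀ (combination : List (List String)), Dom_all_components_from_same_provider combination → Spec_all_components_from_same_provider combination (all_components_from_same_provider combination)

-- ===== LEMMAS AND PROOFS =====

-- proof-only helper: B's state machine over the list of matched providers only
def pvStep (seen : Option String) : List String → Option (Option String)
  | [] => some seen
  | p :: rest =>
      match seen with
      | none => pvStep (some p) rest
      | some q => if q = p then pvStep seen rest else none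

-- A's nested stack/component loops are one loop over the flattened component list
theorem pv_foldl_flat {γ : Type} (f : γ → String → γ) :
    ∀ (L : List (List String)) (c : γ),
      L.foldl (fun c s => s.foldl f c) c = (L.flatMap (fun s => s)).foldl f c := by
  intro L
  induction L with
  | nil => intro c; rfl
  | cons s L ih => intro c; simp [List.flatMap_cons, List.foldl_append, ih]

-- the break-loop over the literal provider list equals B's classifier
theorem pv_matchLoop_eq (c : PySem.Dict String Int) (component : String) :
    pvMatchLoop c component pvProviders =
      match pvClassify component with
      | none => c
      | some p => c.modify p 0 (· + 1) := by
  unfold pvClassify pvProviders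
  cases hA : PySem.Str.isIn "Amazon" component <;>
  cases hZ : PySem.Str.isIn "Azure" component <;>
  cases hG : PySem.Str.isIn "Google" component <;>
    simp only [pvMatchLoop, hA, hZ, hG, if_true, if_false, Bool.false_eq_true]

-- folding A's per-component step is folding over the matched providers only
theorem pv_foldl_filterMap (xs : List String) :
    ∀ (c : PySem.Dict String Int),
      xs.foldl (fun c component => pvMatchLoop c component pvProviders) c =
        (xs.filterMap pvClassify).foldl (fun c p => c.modify p 0 (· + 1)) c := by
  induction xs with
  | nil => intro c; rfl
  | cons x xs ih =>
    intro c
    rw [List.foldl_cons, List.filterMap_cons, pv_matchLoop_eq]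
    cases h : pvClassify x <;> simp only [List.foldl_cons] <;> exact ih _

-- the counts dict after the fold, with the three fixed keys
theorem pv_dict_fold (ps : List String)
    (hps : ∀ p ∈ ps, p = "Amazon" ∨ p = "Azure" ∨ p = "Google") :
    ∀ (a z g : Int),
      ps.foldl (fun c p => c.modify p 0 (· + 1))
          (PySem.Dict.mk [("Amazon", a), ("Azure", z), ("Google", g)]) =
        PySem.Dict.mk [("Amazon", a + (ps.count "Amazon" : Int)),
          ("Azure", z + (ps.count "Azure" : Int)), ("Google", g + (ps.count "Google" : Int))] := by
  induction ps with
  | nil => intro a z g; simp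
  | cons p ps ih =>
    intro a z g
    have hp := hps p (by simp)
    have hps' : ∀ q ∈ ps, q = "Amazon" ∨ q = "Azure" ∨ q = "Google" := by
      intro q hq; exact hps q (by simp [hq])
    rcases hp with h | h | h <;> subst h
    · rw [List.foldl_cons,
        show (PySem.Dict.mk [("Amazon", a), ("Azure", z), ("Google", g)]).modify "Amazon" 0 (· + 1)
          = PySem.Dict.mk [("Amazon", a + 1), ("Azure", z), ("Google", g)] from rfl,
        ih hps']
      simp
      ring
    · rw [List.foldl_cons,
        show (PySem.Dict.mk [("Amazon", a), ("Azure", z), ("Google", g)]).modify "Azure" 0 (· + 1)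
          = PySem.Dict.mk [("Amazon", a), ("Azure", z + 1), ("Google", g)] from rfl,
        ih hps']
      simp
      ring
    · rw [List.foldl_cons,
        show (PySem.Dict.mk [("Amazon", a), ("Azure", z), ("Google", g)]).modify "Google" 0 (· + 1)
          = PySem.Dict.mk [("Amazon", a), ("Azure", z), ("Google", g + 1)] from rfl,
        ih hps']
      simp
      ring

-- B's inner loop is the state machine over the matched providers of the stack
theorem pv_inner_eq (xs : List String) :
    ∀ (seen : Option String), pvInner seen xs = pvStep seen (xs.filterMap pvClassify) := by
  induction xs with
  | nil => intro seen; rfl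
  | cons x xs ih =>
    intro seen
    simp only [pvInner, List.filterMap_cons]
    cases h : pvClassify x with
    | none => exact ih seen
    | some p =>
      cases seen with
      | none => simp only [pvStep]; exact ih (some p)
      | some q =>
        by_cases hq : q = p
        · simp only [pvStep, if_pos hq]; exact ih (some q)
        · simp only [pvStep, if_neg hq]

-- the state machine splits over append
theorem pv_step_append (xs ys : List String) :
    ∀ (seen : Option String),
      pvStep seen (xs ++ ys) =
        match pvStep seen xs with
        | none => none
        | some s => pvStep s ys := by
  induction xs with
  | nil => intro seen; rfl
  | cons p xs ih =>
    intro seen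
    cases seen with
    | none => simpa only [List.cons_append, pvStep] using ih (some p)
    | some q =>
      by_cases hq : q = p
      · subst hq
        simpa only [List.cons_append, pvStep, if_pos rfl] using ih (some q)
      · simp [List.cons_append, pvStep, hq]

-- B's outer loop = the state machine over all matched providers of the flattened input
theorem pv_outer_eq (L : List (List String)) :
    ∀ (seen : Option String),
      pvOuter seen L =
        match pvStep seen ((L.flatMap (fun s => s)).filterMap pvClassify) with
        | none => false
        | some _ => true := by
  induction L with
  | nil => intro seen; rfl
  | cons s L ih =>
    intro seen
    simp only [pvOuter, List.flatMap_cons, List.filterMap_append, pv_step_append, pv_inner_eq]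
    cases h : pvStep seen (s.filterMap pvClassify) with
    | none => rfl
    | some s' => exact ih s'

-- the machine started at a seen provider succeeds iff every further match equals it
theorem pv_step_some (ps : List String) :
    ∀ (q : String),
      pvStep (some q) ps = if ps.all (fun r => r == q) then some (some q) else none := by
  induction ps with
  | nil => intro q; rfl
  | cons p ps ih =>
    intro q
    by_cases hq : q = p
    · subst hq; simp only [pvStep, List.all_cons, beq_self_eq_true, Bool.true_and]
      exact ih q
    · simp [pvStep, hq, Ne.symm hq]

-- if some element of ps differs from the head p, two distinct providers are both present
theorem pv_count_pos (ps : List String) (x : String) (hx : x ∈ ps) : 0 < (ps.count x : Int) := by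
  exact_mod_cast List.count_pos_iff.mpr hx

-- ===== VERDICT (by name: the statement is the Claim_ definition above) =====
theorem all_components_from_same_provider_spec : Claim_equal_all_components_from_same_provider := by
  unfold Claim_equal_all_components_from_same_provider Spec_all_components_from_same_provider
  intro combination _
  unfold all_components_from_same_provider all_components_from_same_provider_alt
  simp only []
  rw [pv_foldl_flat, pv_foldl_filterMap,
    show pvProviders.foldl (fun d p => d.insert p (0 : Int)) PySem.Dict.empty
      = PySem.Dict.mk [("Amazon", (0 : Int)), ("Azure", 0), ("Google", 0)] from rfl,
    pv_outer_eq]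
  set ps := (combination.flatMap fun stack => stack).filterMap pvClassify with hps_def
  have hmem : ∀ p ∈ ps, p = "Amazon" ∨ p = "Azure" ∨ p = "Google" := by
    intro p hp
    obtain ⟨comp, -, hcl⟩ := List.mem_filterMap.mp hp
    unfold pvClassify at hcl
    split_ifs at hcl <;> simp_all
  rw [pv_dict_fold ps hmem]
  simp only [PySem.Dict.values, List.map_cons, List.map_nil, List.foldl_cons, List.foldl_nil,
    zero_add]
  cases hps : ps with
  | nil => simp [pvStep]
  | cons p rest =>
    simp only [pvStep, pv_step_some]
    by_cases hall : ∀ r ∈ rest, r = p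
    · have hall' : rest.all (fun r => r == p) = true := by
        simp only [List.all_eq_true, beq_iff_eq]; exact hall
      have hallps : ∀ r ∈ ps, r = p := by
        intro r hr; rw [hps] at hr
        rcases List.mem_cons.mp hr with h | h
        · exact h
        · exact hall r h
      have hnot : ∀ q : String, q ≠ p → q ∉ ps := by
        intro q hqp hq; exact hqp (hallps q hq)
      have hcnt : ∀ q : String, q ≠ p → ps.count q = 0 :=
        fun q hq => List.count_eq_zero.mpr (hnot q hq)
      have hppos : 0 < (ps.count p : Int) := pv_count_pos ps p (by rw [hps]; simp)
      rcases hmem p (by rw [hps]; simp) with h | h | h <;> subst h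
      · rw [← hps, hcnt "Google" (by decide), hcnt "Azure" (by decide)]
        simp [hall']
        split_ifs <;> omega
      · rw [← hps, hcnt "Google" (by decide), hcnt "Amazon" (by decide)]
        simp [hall']
        split_ifs <;> omega
      · rw [← hps, hcnt "Azure" (by decide), hcnt "Amazon" (by decide)]
        simp [hall']
        split_ifs <;> omega
    · push Not at hall
      obtain ⟨r, hr, hrp⟩ := hall
      have hall' : rest.all (fun x => x == p) = false := by
        simp only [List.all_eq_false]; exact ⟨r, hr, by simpa using hrp⟩
      have hppos : 0 < (ps.count p : Int) := pv_count_pos ps p (by rw [hps]; simp)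
      have hrpos : 0 < (ps.count r : Int) := pv_count_pos ps r (by rw [hps]; simp [hr])
      rcases hmem p (by rw [hps]; simp) with h | h | h <;>
        rcases hmem r (by rw [hps]; simp [hr]) with h' | h' | h' <;>
        subst h <;> subst h' <;> first
        | exact absurd rfl hrp
        | (rw [← hps]
           simp only [hall', Bool.false_eq_true, if_false]
           rw [decide_eq_false_iff_not]
           split_ifs <;> omega)
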